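-- pv_equiv track=rewrite | github.com/Vialon17/LearningNote | Algorithm/Algorithm_Practice.py | min_item
-- ===== SOURCE A (Python) =====
-- def min_item(ids: list, m: int) -> int:
--     # write your code here
--     from collections import Counter
--     count = sorted(Counter(ids).values(), reverse = True)
--     if count == [1]:
--         return 0
--     while count and count[-1] <= m:
--         value = count.pop()
--         m -= value
--     return len(count)
-- ===== SOURCE B (Python) =====
-- def min_item(ids: list, m: int) -> int:
--     # bucket-count frequencies and walk buckets in ascending frequency order (no sort)
--     counts = {}
--     for x in ids:
--         counts[x] = counts.get(x, 0) + 1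
--     bucket = {}
--     for c in counts.values():
--         bucket[c] = bucket.get(c, 0) + 1
--     distinct = len(counts)
--     n = len(ids)
--     for f in range(1, n + 1):
--         if m < f:
--             break
--         k = min(bucket.get(f, 0), m // f)
--         distinct -= k
--         m -= k * f
--     return distinct
-- ===== Notes on version B (the rewrite author's own statement) =====
-- stated objective: alternative
-- what changed: replaces sort-descending-then-pop with a frequency-bucket dictionary walked in ascending frequency order, removing whole buckets at once with integer division; asymptotically O(n) vs O(n log n) but not measurably faster at the tested sizes
-- intended difference: On single-element lists with m <= 0, A's special case 'count == [1]' returns 0 although no removal is allowed; B returns 1 (the one distinct element remains), which is the intended count. — e.g. on min_item([5], 0): A returns 0, B returns 1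
import Mathlib
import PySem

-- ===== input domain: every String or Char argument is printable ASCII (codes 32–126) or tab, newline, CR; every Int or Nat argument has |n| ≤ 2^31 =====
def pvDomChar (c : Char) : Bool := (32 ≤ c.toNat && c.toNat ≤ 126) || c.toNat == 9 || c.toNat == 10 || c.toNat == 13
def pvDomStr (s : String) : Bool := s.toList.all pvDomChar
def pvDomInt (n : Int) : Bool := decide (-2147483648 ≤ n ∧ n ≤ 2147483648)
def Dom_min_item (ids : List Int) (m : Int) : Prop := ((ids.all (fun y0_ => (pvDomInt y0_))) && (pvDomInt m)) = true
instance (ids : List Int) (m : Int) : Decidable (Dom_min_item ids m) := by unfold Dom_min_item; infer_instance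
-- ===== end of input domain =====

-- B replaces A's sort-descending-then-pop loop by a frequency-bucket dictionary walked in
-- ascending frequency order, removing whole buckets at once with integer division (no sort).
-- A's 'count == [1]' special case returns 0 on single-element input even when m ≤ 0; B returns 1 there (see D_).

-- ===== PORT A =====
-- 'while count and count[-1] <= m: value = count.pop(); m -= value' then 'return len(count)'
def minItemLoop (count : List Int) (m : Int) : Int :=
  if h : count = [] then 0
  else if count.getLast h ≤ m then minItemLoop count.dropLast (m - count.getLast h)
  else (count.length : Int)
termination_by count.length
decreasing_by
  simp [List.length_dropLast]
  exact List.length_pos_iff.mpr h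

def min_item (ids : List Int) (m : Int) : Int :=
  let count := PySem.List.sorted (PySem.Dict.counter ids).values (fun x => x) true
  if count = [1] then 0
  else minItemLoop count m

-- ===== PORT B =====
-- 'for f in range(1, n+1): if m < f: break; k = min(bucket.get(f,0), m//f); distinct -= k; m -= k*f'
def altLoop (bucket : PySem.Dict Int Int) : List Int → Int → Int → Int
  | [], _, distinct => distinct
  | f :: fs, m, distinct =>
    if m < f then distinct
    else
      let k := min (bucket.getD f 0) (PySem.Int.floordiv m f)
      altLoop bucket fs (m - k * f) (distinct - k)

def min_item_alt (ids : List Int) (m : Int) : Int :=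
  let counts := ids.foldl (fun d x => d.insert x (d.getD x 0 + 1)) PySem.Dict.empty
  let bucket := counts.values.foldl (fun d c => d.insert c (d.getD c 0 + 1)) PySem.Dict.empty
  let n := (ids.length : Int)
  altLoop bucket (PySem.List.pyRange 1 (n + 1) 1) m (counts.size : Int)

-- ===== PRECONDITION & SPEC =====
-- On single-element lists with m ≤ 0 A's 'count == [1]' special case returns 0 although nothing
-- may be removed; B returns 1 (the one distinct element remains), the intended count.
def D_min_item (ids : List Int) (m : Int) : Prop := ids.length = 1 ∧ m ≤ 0
instance (ids : List Int) (m : Int) : Decidable (D_min_item ids m) := by unfold D_min_item; infer_instance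

def Spec_min_item (ids : List Int) (m : Int) (out : Int) : Prop := ¬ D_min_item ids m → out = min_item_alt ids m
instance (ids : List Int) (m : Int) (out : Int) : Decidable (Spec_min_item ids m out) := by unfold Spec_min_item; infer_instance

def pvDiffWitness_min_item : List Int × Int := ([5], 0)
def pvDiffWitnessOut_min_item : Int × Int := (0, 1)

-- ===== CLAIM (what is proved, stated in full; the proofs are below) =====
def Claim_unchanged_min_item : Prop := ∀ (ids : List Int) (m : Int), Dom_min_item ids m → Spec_min_item ids m (min_item ids m)
def Claim_changed_min_item : Prop := Dom_min_item (pvDiffWitness_min_item.1) (pvDiffWitness_min_item.2) ∧ D_min_item (pvDiffWitness_min_item.1) (pvDiffWitness_min_item.2) ∧ min_item (pvDiffWitness_min_item.1) (pvDiffWitness_min_item.2) = pvDiffWitnessOut_min_item.1 ∧ min_item_alt (pvDiffWitness_min_item.1) (pvDiffWitness_min_item.2) = pvDiffWitnessOut_min_item.2 ∧ pvDiffWitnessOut_min_item.1 ≠ pvDiffWitnessOut_min_item.2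
def Claim_exact_min_item : Prop := ∀ (ids : List Int) (m : Int), Dom_min_item ids m → D_min_item ids m → min_item ids m ≠ min_item_alt ids m

-- ===== LEMMAS AND PROOFS =====

-- proof-side view of A's loop: process the ascending (reversed) list from the front
def loopAsc : List Int → Int → Int
  | [], _ => 0
  | v :: vs, m => if v ≤ m then loopAsc vs (m - v) else ((v :: vs).length : Int)

lemma minItemLoop_reverse : ∀ (r : List Int) (m : Int), minItemLoop r.reverse m = loopAsc r m := by
  intro r
  induction r with
  | nil => intro m; simp [minItemLoop, loopAsc]
  | cons v vs ih =>
    intro m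
    rw [List.reverse_cons, minItemLoop]
    have hne : vs.reverse ++ [v] ≠ [] := by simp
    rw [dif_neg hne]
    rw [List.getLast_append_singleton (l := vs.reverse)]
    rw [List.dropLast_concat]
    by_cases hv : v ≤ m
    · rw [if_pos hv, ih, loopAsc, if_pos hv]
    · rw [if_neg hv, loopAsc, if_neg hv]
      simp

lemma loopAsc_all_gt (l : List Int) (m : Int) (h : ∀ v ∈ l, m < v) : loopAsc l m = (l.length : Int) := by
  cases l with
  | nil => simp [loopAsc]
  | cons v vs =>
    rw [loopAsc, if_neg]
    exact not_le.mpr (h v (by simp))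

lemma floordiv_sub_self (m f : Int) (hf : 0 < f) :
    PySem.Int.floordiv (m - f) f = PySem.Int.floordiv m f - 1 := by
  rw [PySem.Int.floordiv_eq_iff_of_pos (hb := hf)]
  have h1 := PySem.Int.floordiv_mul_add_mod m f
  have h2 := PySem.Int.mod_nonneg (a := m) hf
  have h3 := PySem.Int.mod_lt (a := m) hf
  constructor <;> nlinarith

lemma loopAsc_replicate_le (f : Int) (hf : 0 < f) :
    ∀ (c : Nat) (m : Int) (rest : List Int), (c : Int) ≤ PySem.Int.floordiv m f → 0 ≤ m →
      loopAsc (List.replicate c f ++ rest) m = loopAsc rest (m - (c : Int) * f) := by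
  intro c
  induction c with
  | zero => intro m rest _ _; simp
  | succ c ih =>
    intro m rest hc hm
    have hfm : f ≤ m := by
      have h1 : (1 : Int) ≤ PySem.Int.floordiv m f := by
        have : ((c : Int) + 1) ≤ PySem.Int.floordiv m f := by exact_mod_cast hc
        omega
      have := (PySem.Int.le_floordiv_iff_mul_le (hb := hf) (q := 1) (a := m)).mp h1
      linarith
    rw [List.replicate_succ, List.cons_append, loopAsc, if_pos hfm]
    rw [ih (m - f) rest ?_ (by linarith)]
    · congr 1; push_cast; ring
    · rw [floordiv_sub_self _ _ hf]
      push_cast at hc ⊢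
      omega

lemma loopAsc_replicate_gt (f : Int) (hf : 0 < f) :
    ∀ (c : Nat) (m : Int) (rest : List Int), 0 ≤ m → PySem.Int.floordiv m f < (c : Int) →
      loopAsc (List.replicate c f ++ rest) m
        = ((c : Int) - PySem.Int.floordiv m f) + (rest.length : Int) := by
  intro c
  induction c with
  | zero =>
    intro m rest hm hc
    exfalso
    have : (0:Int) ≤ PySem.Int.floordiv m f := by
      rw [PySem.Int.le_floordiv_iff_mul_le (hb := hf)]; simpa
    omega
  | succ c ih =>
    intro m rest hm hc
    by_cases hfm : f ≤ m
    · rw [List.replicate_succ, List.cons_append, loopAsc, if_pos hfm]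
      rw [ih (m - f) rest (by linarith) ?_]
      · rw [floordiv_sub_self _ _ hf]; push_cast; ring
      · rw [floordiv_sub_self _ _ hf]; push_cast at hc ⊢; omega
    · have hd0 : PySem.Int.floordiv m f = 0 := by
        rw [PySem.Int.floordiv_eq_iff_of_pos (hb := hf)]
        constructor <;> [simpa; linarith [not_le.mp hfm]]
      rw [List.replicate_succ, List.cons_append, loopAsc, if_neg hfm]
      simp [hd0]
      omega

lemma altLoop_all_gt (bucket : PySem.Dict Int Int) (fs : List Int) (m d : Int)
    (h : ∀ f ∈ fs, m < f) : altLoop bucket fs m d = d := by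
  cases fs with
  | nil => rfl
  | cons f fs => rw [altLoop, if_pos (h f (by simp))]

-- the heart: walking the buckets equals popping the ascending frequency list one by one
lemma altLoop_eq_loopAsc (bucket : PySem.Dict Int Int) (cnt : Int → Nat) :
    ∀ (fs : List Int), fs.Pairwise (· < ·) → (∀ f ∈ fs, 0 < f) →
      (∀ f ∈ fs, bucket.getD f 0 = (cnt f : Int)) → ∀ (m : Int),
      altLoop bucket fs m (((fs.flatMap (fun f => List.replicate (cnt f) f)).length : Int))
        = loopAsc (fs.flatMap (fun f => List.replicate (cnt f) f)) m := by
  intro fs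
  induction fs with
  | nil => intro _ _ _ m; simp [altLoop, loopAsc]
  | cons f fs ih =>
    intro hpw hpos hb m
    have hf : 0 < f := hpos f (by simp)
    have hblt : ∀ f' ∈ fs, f < f' := by
      intro f' hf'; exact (List.pairwise_cons.mp hpw).1 f' hf'
    by_cases hmf : m < f
    · rw [altLoop, if_pos hmf]
      rw [loopAsc_all_gt]
      intro v hv
      rw [List.mem_flatMap] at hv
      obtain ⟨f', hf', hv⟩ := hv
      rw [List.eq_of_mem_replicate hv]
      rcases List.mem_cons.mp hf' with h | h
      · exact h ▸ hmf
      · exact lt_trans hmf (hblt f' h)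
    · have hmf' : f ≤ m := not_lt.mp hmf
      have hm0 : 0 ≤ m := le_trans (le_of_lt hf) hmf'
      rw [altLoop, if_neg hmf]
      simp only [List.flatMap_cons, List.length_append, List.length_replicate]
      rw [hb f (by simp)]
      by_cases hk : (cnt f : Int) ≤ PySem.Int.floordiv m f
      · rw [min_eq_left hk]
        rw [loopAsc_replicate_le f hf (cnt f) m _ hk hm0]
        rw [show ((cnt f + (fs.flatMap fun f => List.replicate (cnt f) f).length : Nat) : Int) - (cnt f : Int)
            = ((fs.flatMap fun f => List.replicate (cnt f) f).length : Int) by push_cast; ring]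
        exact ih (List.pairwise_cons.mp hpw).2 (fun g hg => hpos g (by simp [hg]))
          (fun g hg => hb g (by simp [hg])) (m - (cnt f : Int) * f)
      · have hklt : PySem.Int.floordiv m f < (cnt f : Int) := not_le.mp hk
        rw [min_eq_right (le_of_lt hklt)]
        rw [loopAsc_replicate_gt f hf (cnt f) m _ hm0 hklt]
        have hmod : m - PySem.Int.floordiv m f * f = PySem.Int.mod m f := by
          have := PySem.Int.floordiv_mul_add_mod m f; linarith
        rw [altLoop_all_gt]
        · push_cast; ring
        · intro f' hf'
          calc m - PySem.Int.floordiv m f * f = PySem.Int.mod m f := hmod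
            _ < f := PySem.Int.mod_lt (a := m) hf
            _ < f' := hblt f' hf'

lemma count_flatMap_replicate (cnt : Int → Nat) :
    ∀ (fs : List Int), fs.Nodup → ∀ g : Int,
      (fs.flatMap (fun f => List.replicate (cnt f) f)).count g = if g ∈ fs then cnt g else 0 := by
  intro fs
  induction fs with
  | nil => simp
  | cons f fs ih =>
    intro hnd g
    have hnd' := List.nodup_cons.mp hnd
    rw [List.flatMap_cons, List.count_append, List.count_replicate, ih hnd'.2 g]
    by_cases hg : g = f
    · subst hg
      simp [hnd'.1]
    · simp [hg, Ne.symm hg]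

lemma pairwise_le_flatMap_replicate (cnt : Int → Nat) :
    ∀ (fs : List Int), fs.Pairwise (· < ·) →
      (fs.flatMap (fun f => List.replicate (cnt f) f)).Pairwise (· ≤ ·) := by
  intro fs
  induction fs with
  | nil => simp
  | cons f fs ih =>
    intro hpw
    have h' := List.pairwise_cons.mp hpw
    rw [List.flatMap_cons, List.pairwise_append]
    refine ⟨List.pairwise_replicate.mpr (Or.inr (le_refl f)), ih h'.2, ?_⟩
    intro a ha b hb
    rw [List.eq_of_mem_replicate ha]
    rw [List.mem_flatMap] at hb
    obtain ⟨f', hf', hb⟩ := hb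
    rw [List.eq_of_mem_replicate hb]
    exact le_of_lt (h'.1 f' hf')

lemma vals_bounds (ids : List Int) :
    ∀ v ∈ (PySem.Dict.counter ids).values, 1 ≤ v ∧ v ≤ (ids.length : Int) := by
  intro v hv
  have : (PySem.Dict.counter ids).values
      = ((PySem.Set.ofList ids).map (fun k => (k, (ids.count k : Int)))).map (·.2) := by
    rw [show (PySem.Dict.counter ids).values = (PySem.Dict.counter ids).items.map (·.2) from rfl,
        PySem.Dict.items_counter]
  rw [this] at hv
  simp only [List.map_map, List.mem_map] at hv
  obtain ⟨k, hk, hkv⟩ := hv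
  have hkmem : k ∈ ids := (PySem.Set.mem_ofList _ _).mp hk
  constructor
  · rw [← hkv]
    simp only [Function.comp]
    exact_mod_cast List.count_pos_iff.mpr hkmem
  · rw [← hkv]
    simp only [Function.comp]
    exact_mod_cast List.count_le_length (l := ids) (a := k)

-- characterisation of B: it processes the reversed descending sort of the frequency values
lemma min_item_alt_char (ids : List Int) (m : Int) :
    min_item_alt ids m
      = loopAsc ((PySem.List.sorted (PySem.Dict.counter ids).values (fun x => x) true).reverse) m := by
  show altLoop ((PySem.Dict.counter ids).values.foldl (fun d c => d.insert c (d.getD c 0 + 1)) PySem.Dict.empty)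
      (PySem.List.pyRange 1 ((ids.length : Int) + 1) 1) m ((PySem.Dict.counter ids).size : Int)
    = loopAsc ((PySem.List.sorted (PySem.Dict.counter ids).values (fun x => x) true).reverse) m
  set vals := (PySem.Dict.counter ids).values with hvals
  set n : Int := (ids.length : Int) with hn
  set fs := PySem.List.pyRange 1 (n + 1) 1 with hfs
  set cnt : Int → Nat := fun g => vals.count g with hcnt
  set E := fs.flatMap (fun f => List.replicate (cnt f) f) with hE
  -- the bucket dict counts the frequency values
  have hbucket : ∀ f, (vals.foldl (fun d c => d.insert c (d.getD c 0 + 1)) PySem.Dict.empty).getD f 0 = (cnt f : Int) := by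
    intro f
    rw [PySem.Dict.getD_foldl_insert_add_one]
    simp [PySem.Dict.getD_empty, hcnt]
  have hnd : fs.Nodup := PySem.List.nodup_pyRange_one 1 (n + 1)
  have hpw : fs.Pairwise (· < ·) := PySem.List.pairwise_lt_pyRange_one 1 (n + 1)
  have hmemfs : ∀ f, f ∈ fs ↔ 1 ≤ f ∧ f < n + 1 := fun f => PySem.List.mem_pyRange_one
  -- E is a permutation of vals
  have hperm : E.Perm vals := by
    rw [List.perm_iff_count]
    intro g
    rw [hE, count_flatMap_replicate cnt fs hnd g]
    by_cases hg : g ∈ fs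
    · rw [if_pos hg]
    · rw [if_neg hg]
      symm
      rw [List.count_eq_zero]
      intro hgv
      exact hg ((hmemfs g).mpr ⟨(vals_bounds ids g hgv).1, by linarith [(vals_bounds ids g hgv).2]⟩)
  -- E is exactly the reverse of the descending sort of vals
  have hsorted : E = (PySem.List.sorted vals (fun x => x) true).reverse := by
    apply PySem.List.eq_of_perm_of_pairwise_le_of_injective (fun x => x) (fun a b h => h)
    · exact hperm.trans ((PySem.List.sorted_perm vals (fun x => x) true).symm.trans
        (List.reverse_perm _).symm)
    · exact pairwise_le_flatMap_replicate cnt fs hpw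
    · rw [List.pairwise_reverse]
      exact PySem.List.sorted_pairwise_rev vals (fun x => x)
  -- the initial 'distinct' is the length of E
  have hsize : ((PySem.Dict.counter ids).size : Int) = (E.length : Int) := by
    rw [hperm.length_eq]
    simp [PySem.Dict.size, PySem.Dict.values, hvals]
  rw [hsize, altLoop_eq_loopAsc _ cnt fs hpw
    (fun f hf => by have := (hmemfs f).mp hf; omega)
    (fun f _ => hbucket f) m, ← hE, hsorted]

lemma sorted_singleton_of_one (ids : List Int)
    (h : PySem.List.sorted (PySem.Dict.counter ids).values (fun x => x) true = [1]) :
    ids.length = 1 := by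
  have hperm : (PySem.Dict.counter ids).values.Perm [1] := by
    have := PySem.List.sorted_perm (PySem.Dict.counter ids).values (fun x => x) true
    rw [h] at this
    exact this.symm
  have hvals : (PySem.Dict.counter ids).values = [1] := List.perm_singleton.mp hperm
  have hitems : ((PySem.Set.ofList ids).map (fun k => (k, (ids.count k : Int)))).map (·.2) = [1] := by
    rw [← PySem.Dict.items_counter]
    exact hvals
  rw [List.map_map] at hitems
  obtain ⟨k, hk⟩ : ∃ k, PySem.Set.ofList ids = [k] := by
    rcases hd : PySem.Set.ofList ids with _ | ⟨k, rest⟩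
    · rw [hd] at hitems; simp at hitems
    · rw [hd] at hitems
      rcases rest with _ | ⟨k', rest'⟩
      · exact ⟨k, rfl⟩
      · simp at hitems
  rw [hk] at hitems
  simp only [List.map_cons, List.map_nil, Function.comp] at hitems
  have hcount : ids.count k = 1 := by
    exact_mod_cast (List.cons_eq_cons.mp hitems).1
  have hall : ∀ x ∈ ids, x = k := by
    intro x hx
    have : x ∈ PySem.Set.ofList ids := (PySem.Set.mem_ofList _ _).mpr hx
    rw [hk] at this
    simpa using this
  have hlen : ids.count k = ids.length := by
    rw [List.count_eq_length]
    intro b hb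
    exact (hall b hb).symm
  omega

-- ===== VERDICT (by name: the statement is the Claim_ definition above) =====
theorem min_item_spec : Claim_unchanged_min_item := by
  intro ids m _ hnD
  show (if PySem.List.sorted (PySem.Dict.counter ids).values (fun x => x) true = [1] then (0:Int)
    else minItemLoop (PySem.List.sorted (PySem.Dict.counter ids).values (fun x => x) true) m)
    = min_item_alt ids m
  by_cases hS : PySem.List.sorted (PySem.Dict.counter ids).values (fun x => x) true = [1]
  · rw [if_pos hS]
    have hlen := sorted_singleton_of_one ids hS
    have hm : 1 ≤ m := by
      by_contra hm'
      exact hnD ⟨hlen, by omega⟩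
    rw [min_item_alt_char, hS]
    simp [loopAsc, hm]
  · rw [if_neg hS, min_item_alt_char]
    have := minItemLoop_reverse
      (PySem.List.sorted (PySem.Dict.counter ids).values (fun x => x) true).reverse m
    rw [List.reverse_reverse] at this
    exact this

theorem min_item_changed : Claim_changed_min_item := by unfold Claim_changed_min_item; decide

theorem min_item_tight : Claim_exact_min_item := by
  intro ids m _ hD
  obtain ⟨hlen, hm⟩ := hD
  obtain ⟨x, hids⟩ : ∃ x, ids = [x] := by
    rcases ids with _ | ⟨x, rest⟩
    · simp at hlen
    · rcases rest with _ | _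
      · exact ⟨x, rfl⟩
      · simp at hlen
  subst hids
  have hvals : (PySem.Dict.counter [x]).values = [1] := by
    rw [show (PySem.Dict.counter [x]).values = (PySem.Dict.counter [x]).items.map (·.2) from rfl,
        PySem.Dict.items_counter]
    simp [PySem.Set.ofList]
  have hS : PySem.List.sorted (PySem.Dict.counter [x]).values (fun y => y) true = [1] := by
    rw [hvals]
    exact PySem.List.sorted_rev_eq_self_of_pairwise _ _ (List.pairwise_singleton _ _)
  have hA : min_item [x] m = 0 := by
    show (if PySem.List.sorted (PySem.Dict.counter [x]).values (fun y => y) true = [1] then (0:Int)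
      else minItemLoop (PySem.List.sorted (PySem.Dict.counter [x]).values (fun y => y) true) m) = 0
    rw [if_pos hS]
  have hB : min_item_alt [x] m = 1 := by
    rw [min_item_alt_char, hS]
    simp [loopAsc]
    omega
  rw [hA, hB]
  decide
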